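-- pv_equiv track=rewrite | github.com/Charmstok/sarathi-serve | sarathi/utils/prompt_utils.py | _interleave_bucket_indices
-- ===== SOURCE A (Python) =====
-- from typing import Any, Callable, Dict, List, Optional, Sequence, Tuple, Union
--
-- def _interleave_bucket_indices(num_buckets: int) -> List[int]:
--     order: List[int] = []
--     left = 0
--     right = num_buckets - 1
--
--     while left <= right:
--         order.append(left)
--         if left != right:
--             order.append(right)
--         left += 1
--         right -= 1
--
--     return order
-- ===== SOURCE B (Python) =====
-- from typing import List
--
--
-- def _interleave_bucket_indices(num_buckets: int) -> List[int]:
--     # single index loop, parity picks front or back element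
--     return [
--         i // 2 if i % 2 == 0 else num_buckets - 1 - i // 2
--         for i in range(num_buckets)
--     ]
-- ===== Notes on version B (the rewrite author's own statement) =====
-- stated objective: idiomatic
-- what changed: Replaces the converging left/right two-pointer while-loop (with a middle-element special case) by a single comprehension over range(num_buckets) that computes each position directly from the parity of its index.
import Mathlib
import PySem

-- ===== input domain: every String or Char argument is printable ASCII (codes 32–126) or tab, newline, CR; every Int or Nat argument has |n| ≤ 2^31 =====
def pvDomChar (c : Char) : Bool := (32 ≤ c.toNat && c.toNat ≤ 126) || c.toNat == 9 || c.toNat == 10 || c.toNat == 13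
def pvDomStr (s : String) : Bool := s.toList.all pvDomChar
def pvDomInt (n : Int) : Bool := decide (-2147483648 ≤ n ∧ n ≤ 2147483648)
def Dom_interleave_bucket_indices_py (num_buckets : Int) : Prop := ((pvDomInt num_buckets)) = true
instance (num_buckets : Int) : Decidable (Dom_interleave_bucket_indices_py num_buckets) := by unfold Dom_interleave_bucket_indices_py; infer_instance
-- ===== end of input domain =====

-- B replaces A's converging left/right two-pointer while-loop (with a middle-element
-- special case) by one comprehension over range(num_buckets) choosing front/back by
-- index parity (idiomatic).

-- ===== PORT A =====
-- A's while-loop: per iteration append left, append right if distinct, then converge.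
def pvGoA (left right : Int) : List Int :=
  if left ≤ right then
    left :: ((if left ≠ right then [right] else []) ++ pvGoA (left + 1) (right - 1))
  else []
termination_by (right - left + 1).toNat
decreasing_by omega

def interleave_bucket_indices_py (num_buckets : Int) : List Int :=
  pvGoA 0 (num_buckets - 1)

-- ===== PORT B =====
def interleave_bucket_indices_py_alt (num_buckets : Int) : List Int :=
  (PySem.List.pyRange 0 num_buckets 1).map (fun i =>
    if PySem.Int.mod i 2 = 0 then PySem.Int.floordiv i 2
    else num_buckets - 1 - PySem.Int.floordiv i 2)

-- ===== PRECONDITION & SPEC =====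
def Spec_interleave_bucket_indices_py (num_buckets : Int) (out : List Int) : Prop := out = interleave_bucket_indices_py_alt num_buckets
instance (num_buckets : Int) (out : List Int) : Decidable (Spec_interleave_bucket_indices_py num_buckets out) := by unfold Spec_interleave_bucket_indices_py; infer_instance

-- ===== CLAIM (what is proved, stated in full; the proofs are below) =====
def Claim_equal_interleave_bucket_indices_py : Prop := ∀ (num_buckets : Int), Dom_interleave_bucket_indices_py num_buckets → Spec_interleave_bucket_indices_py num_buckets (interleave_bucket_indices_py num_buckets)

-- ===== LEMMAS AND PROOFS =====

-- A's loop on [l, l+k] produces the parity interleaving, position by position.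
theorem pvGoA_eq (k : Nat) : ∀ (l : Int),
    pvGoA l (l + k) =
      (List.range (k + 1)).map (fun j =>
        if j % 2 = 0 then l + ((j / 2 : Nat) : Int) else l + k - ((j / 2 : Nat) : Int)) := by
  induction k using Nat.strong_induction_on with
  | _ k ih =>
    intro l
    match k with
    | 0 =>
      rw [pvGoA, pvGoA]
      norm_num
    | 1 =>
      rw [pvGoA, pvGoA]
      simp [List.range_succ]
    | k + 2 =>
      have harg : l + ((k + 2 : Nat) : Int) - 1 = (l + 1) + (k : Int) := by push_cast; ring
      rw [pvGoA, if_pos (by push_cast; omega), if_pos (by push_cast; omega), harg]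
      rw [show ((k:Int)) = ((k:Nat):Int) from rfl, ih k (by omega) (l+1)]
      have hr : List.range (k + 2 + 1) = 0 :: 1 :: (List.range (k + 1)).map (fun j => j + 2) := by
        rw [List.range_succ_eq_map, List.range_succ_eq_map, List.map_cons, List.map_map]
        refine List.cons_eq_cons.mpr ⟨rfl, List.cons_eq_cons.mpr ⟨rfl, ?_⟩⟩
        apply List.map_congr_left
        intro j _
        simp [Function.comp]
      rw [hr, List.map_cons, List.map_cons, List.map_map]
      refine List.cons_eq_cons.mpr ⟨by norm_num, ?_⟩
      refine List.cons_eq_cons.mpr ⟨by norm_num, ?_⟩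
      apply List.map_congr_left
      intro j hj
      have hm : (j + 2) % 2 = j % 2 := by omega
      have hd : (j + 2) / 2 = j / 2 + 1 := by omega
      by_cases hp : j % 2 = 0 <;> simp [hm, hd, hp, Function.comp] <;> omega

theorem pv_main (n : Int) : interleave_bucket_indices_py n = interleave_bucket_indices_py_alt n := by
  unfold interleave_bucket_indices_py interleave_bucket_indices_py_alt
  by_cases hn : n ≤ 0
  · rw [pvGoA, if_neg (by omega), PySem.List.pyRange_one_eq_nil (by omega), List.map_nil]
  · set k : Nat := (n - 1).toNat with hk
    have h1 : n - 1 = (0 : Int) + (k : Int) := by omega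
    rw [h1, pvGoA_eq k 0, PySem.List.pyRange_one]
    have h2 : (n - 0).toNat = k + 1 := by omega
    rw [h2, List.map_map]
    apply List.map_congr_left
    intro j hj
    rw [List.mem_range] at hj
    simp only [Function.comp_apply, zero_add]
    rw [PySem.Int.mod_eq_emod_of_pos (by norm_num), PySem.Int.floordiv_eq_ediv_of_pos (by norm_num)]
    have hd : ((j : Int)) / 2 = ((j / 2 : Nat) : Int) := by omega
    by_cases hp : j % 2 = 0
    · rw [if_pos hp, if_pos (show ((j : Int)) % 2 = 0 by omega), hd]
    · rw [if_neg hp, if_neg (show ¬ ((j : Int)) % 2 = 0 by omega), hd]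

-- ===== VERDICT (by name: the statement is the Claim_ definition above) =====
theorem interleave_bucket_indices_py_spec : Claim_equal_interleave_bucket_indices_py := by
  intro n _
  unfold Spec_interleave_bucket_indices_py
  exact pv_main n
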